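-- pv_equiv track=rewrite | github.com/wyk18703232953/myResearch | codeComplex/data/filteredData/python/quadratic/python_quadratic_0204.py | generate_input
-- ===== SOURCE A (Python) =====
-- def generate_input(n):
--     if n <= 0:
--         n = 1
--     m = n
--     l = []
--     for i in range(n):
--         row = []
--         for j in range(m):
--             val = (i + j) % 2
--             row.append(val)
--         l.append(row)
--     return n, m, l
-- ===== SOURCE B (Python) =====
-- def generate_input(n):
--     if n <= 0:
--         n = 1
--     m = n
--     base = [j % 2 for j in range(m)]
--     flipped = [1 - x for x in base]
--     l = [list(base) if i % 2 == 0 else list(flipped) for i in range(n)]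
--     return n, m, l
-- ===== Notes on version B (the rewrite author's own statement) =====
-- stated objective: alternative
-- what changed: Replaces the per-cell (i+j)%2 nested loop by precomputing one alternating base row and its complement once, then choosing and copying one of the two templates per row.
import Mathlib
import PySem

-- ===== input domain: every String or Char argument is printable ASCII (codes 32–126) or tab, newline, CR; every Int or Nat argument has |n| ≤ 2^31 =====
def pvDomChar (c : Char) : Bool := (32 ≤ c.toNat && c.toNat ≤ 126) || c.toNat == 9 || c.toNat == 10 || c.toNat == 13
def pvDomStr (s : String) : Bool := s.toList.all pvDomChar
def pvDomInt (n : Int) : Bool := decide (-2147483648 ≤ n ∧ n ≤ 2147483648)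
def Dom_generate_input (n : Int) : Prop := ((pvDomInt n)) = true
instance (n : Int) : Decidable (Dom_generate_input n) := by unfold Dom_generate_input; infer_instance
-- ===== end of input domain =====

-- B precomputes one alternating base row and its complement once and picks one per row, instead of computing (i+j)%2 per cell.


-- ===== PORT A =====
def generate_input (n : Int) : Int × Int × List (List Int) :=
  let n := if n ≤ 0 then 1 else n
  let m := n
  let l := (PySem.List.pyRange 0 n 1).foldl (fun l i =>
    l ++ [(PySem.List.pyRange 0 m 1).foldl (fun row j => row ++ [PySem.Int.mod (i + j) 2]) []]) []
  (n, m, l)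

-- ===== PORT B =====
def generate_input_alt (n : Int) : Int × Int × List (List Int) :=
  let n := if n ≤ 0 then 1 else n
  let m := n
  let base := (PySem.List.pyRange 0 m 1).map (fun j => PySem.Int.mod j 2)
  let flipped := base.map (fun x => 1 - x)
  let l := (PySem.List.pyRange 0 n 1).map (fun i => if PySem.Int.mod i 2 = 0 then base else flipped)
  (n, m, l)

-- ===== PRECONDITION & SPEC =====
def Spec_generate_input (n : Int) (out : Int × Int × List (List Int)) : Prop := out = generate_input_alt n
instance (n : Int) (out : Int × Int × List (List Int)) : Decidable (Spec_generate_input n out) := by unfold Spec_generate_input; infer_instance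

-- ===== CLAIM (what is proved, stated in full; the proofs are below) =====
def Claim_equal_generate_input : Prop := ∀ (n : Int), Dom_generate_input n → Spec_generate_input n (generate_input n)

-- ===== LEMMAS AND PROOFS =====

-- append-accumulator foldl is a map
theorem foldl_append_singleton {α β : Type} (f : α → β) (l : List α) (init : List β) :
    l.foldl (fun acc x => acc ++ [f x]) init = init ++ l.map f := by
  induction l generalizing init with
  | nil => simp
  | cons x xs ih => simp [List.foldl_cons, ih, List.append_assoc]

theorem cell_eq (i j : Int) :
    PySem.Int.mod (i + j) 2 = if PySem.Int.mod i 2 = 0 then PySem.Int.mod j 2 else 1 - PySem.Int.mod j 2 := by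
  rw [PySem.Int.mod_eq_emod_of_pos (by norm_num : (0:Int) < 2),
      PySem.Int.mod_eq_emod_of_pos (by norm_num : (0:Int) < 2),
      PySem.Int.mod_eq_emod_of_pos (by norm_num : (0:Int) < 2)]
  split_ifs with h <;> omega

theorem row_eq (m i : Int) :
    (PySem.List.pyRange 0 m 1).map (fun j => PySem.Int.mod (i + j) 2) =
      if PySem.Int.mod i 2 = 0
      then (PySem.List.pyRange 0 m 1).map (fun j => PySem.Int.mod j 2)
      else ((PySem.List.pyRange 0 m 1).map (fun j => PySem.Int.mod j 2)).map (fun x => 1 - x) := by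
  by_cases h : PySem.Int.mod i 2 = 0
  · rw [if_pos h]; exact List.map_congr_left fun j _ => by rw [cell_eq, if_pos h]
  · rw [if_neg h, List.map_map]; exact List.map_congr_left fun j _ => by rw [cell_eq, if_neg h]; rfl

-- ===== VERDICT (by name: the statement is the Claim_ definition above) =====
theorem generate_input_spec : Claim_equal_generate_input := by
  intro n _
  unfold Spec_generate_input generate_input generate_input_alt
  simp only [foldl_append_singleton, List.nil_append]
  refine congrArg _ (congrArg _ ?_)
  exact List.map_congr_left (fun i _ => row_eq _ i)
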